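-- pv_equiv track=rewrite | github.com/aakaluza/AleksAdventOfCode | 2025/Day4/SolutionPart1.py | calculateAdjacencies
-- ===== SOURCE A (Python) =====
-- def calculateAdjacencies(warehouse: list[list[int]]) -> int:
--     result = 0
--
--
--     for i in range(1, len(warehouse) - 1, 1):
--         for j in range(1, len(warehouse[i]) - 1, 1):
--             if warehouse[i][j] == 1:
--                 sum = warehouse[i-1][j-1] + warehouse[i-1][j] + warehouse[i-1][j+1] + warehouse[i][j-1] + warehouse[i][j+1] + warehouse[i+1][j-1] + warehouse[i+1][j] + warehouse[i+1][j+1]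
--                 if (sum < 4):
--                     result += 1
--
--     return result
-- ===== SOURCE B (Python) =====
-- def calculateAdjacencies(warehouse: list[list[int]]) -> int:
--     # Row-wise prefix sums: each 3-wide neighbor-row sum becomes one subtraction.
--     pref = []
--     for row in warehouse:
--         p = [0]
--         acc = 0
--         for v in row:
--             acc += v
--             p.append(acc)
--         pref.append(p)
--
--     result = 0
--     for i in range(1, len(warehouse) - 1):
--         row = warehouse[i]
--         for j in range(1, len(row) - 1):
--             if row[j] == 1:
--                 block = (pref[i-1][j+2] - pref[i-1][j-1]) \
--                       + (pref[i][j+2] - pref[i][j-1]) \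
--                       + (pref[i+1][j+2] - pref[i+1][j-1])
--                 if block - 1 < 4:
--                     result += 1
--     return result
-- ===== Notes on version B (the rewrite author's own statement) =====
-- stated objective: alternative
-- what changed: Replaces the 8 scattered per-cell neighbor reads with a single preprocessing pass building per-row prefix sums, so each candidate cell's 3x3 block sum is three prefix-difference subtractions (minus the center) instead of eight element lookups.
import Mathlib
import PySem

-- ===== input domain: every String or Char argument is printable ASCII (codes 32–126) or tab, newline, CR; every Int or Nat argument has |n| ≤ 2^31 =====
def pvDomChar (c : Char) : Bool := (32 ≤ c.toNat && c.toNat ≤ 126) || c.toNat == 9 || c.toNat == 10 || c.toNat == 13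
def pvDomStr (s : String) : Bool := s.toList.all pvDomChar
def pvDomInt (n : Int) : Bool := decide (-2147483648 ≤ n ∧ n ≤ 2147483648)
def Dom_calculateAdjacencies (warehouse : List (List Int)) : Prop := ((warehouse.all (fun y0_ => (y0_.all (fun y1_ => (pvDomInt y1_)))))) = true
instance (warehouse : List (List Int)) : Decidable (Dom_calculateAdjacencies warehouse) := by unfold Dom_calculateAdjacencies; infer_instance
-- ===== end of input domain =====

-- B replaces A's eight per-cell neighbor reads with per-row prefix sums queried by
-- three subtractions per candidate cell (objective: alternative decomposition).

-- ===== PORT A =====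
def calculateAdjacencies (warehouse : List (List Int)) : Int :=
  (PySem.List.pyRange 1 ((warehouse.length : Int) - 1) 1).foldl (fun result i =>
    (PySem.List.pyRange 1 (((PySem.List.pyGetD warehouse i []).length : Int) - 1) 1).foldl
      (fun result j =>
        if PySem.List.pyGetD (PySem.List.pyGetD warehouse i []) j 0 = 1 then
          let s :=
            PySem.List.pyGetD (PySem.List.pyGetD warehouse (i-1) []) (j-1) 0 +
            PySem.List.pyGetD (PySem.List.pyGetD warehouse (i-1) []) j 0 +
            PySem.List.pyGetD (PySem.List.pyGetD warehouse (i-1) []) (j+1) 0 +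
            PySem.List.pyGetD (PySem.List.pyGetD warehouse i []) (j-1) 0 +
            PySem.List.pyGetD (PySem.List.pyGetD warehouse i []) (j+1) 0 +
            PySem.List.pyGetD (PySem.List.pyGetD warehouse (i+1) []) (j-1) 0 +
            PySem.List.pyGetD (PySem.List.pyGetD warehouse (i+1) []) j 0 +
            PySem.List.pyGetD (PySem.List.pyGetD warehouse (i+1) []) (j+1) 0
          if s < 4 then result + 1 else result
        else result)
      result) 0

-- ===== PORT B =====
-- prefix sums of one row: p = [0]; for v in row: acc += v; p.append(acc)
def prefixRow (r : List Int) : List Int :=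
  (r.foldl (fun (st : List Int × Int) v => (st.1 ++ [st.2 + v], st.2 + v)) ([0], 0)).1

def calculateAdjacencies_alt (warehouse : List (List Int)) : Int :=
  let pref := warehouse.map prefixRow
  (PySem.List.pyRange 1 ((warehouse.length : Int) - 1) 1).foldl (fun result i =>
    let row := PySem.List.pyGetD warehouse i []
    (PySem.List.pyRange 1 ((row.length : Int) - 1) 1).foldl
      (fun result j =>
        if PySem.List.pyGetD row j 0 = 1 then
          let block :=
            (PySem.List.pyGetD (PySem.List.pyGetD pref (i-1) []) (j+2) 0 -
             PySem.List.pyGetD (PySem.List.pyGetD pref (i-1) []) (j-1) 0) +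
            (PySem.List.pyGetD (PySem.List.pyGetD pref i []) (j+2) 0 -
             PySem.List.pyGetD (PySem.List.pyGetD pref i []) (j-1) 0) +
            (PySem.List.pyGetD (PySem.List.pyGetD pref (i+1) []) (j+2) 0 -
             PySem.List.pyGetD (PySem.List.pyGetD pref (i+1) []) (j-1) 0)
          if block - 1 < 4 then result + 1 else result
        else result)
      result) 0

-- ===== PRECONDITION & SPEC =====
-- Pre_ excludes exactly the inputs where Python A raises IndexError: jagged grids in which
-- some interior cell equals 1 but a neighbor column j+1 falls outside an adjacent row.
def Pre_calculateAdjacencies (warehouse : List (List Int)) : Prop :=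
  ∀ i ∈ List.range warehouse.length, ∀ j ∈ List.range (warehouse.getD i []).length,
    1 ≤ i → i + 1 < warehouse.length → 1 ≤ j → j + 1 < (warehouse.getD i []).length →
    (warehouse.getD i []).getD j 0 = 1 →
    j + 2 ≤ (warehouse.getD (i-1) []).length ∧ j + 2 ≤ (warehouse.getD (i+1) []).length

instance (warehouse : List (List Int)) : Decidable (Pre_calculateAdjacencies warehouse) := by
  unfold Pre_calculateAdjacencies; infer_instance

def pvWitness_calculateAdjacencies : List (List Int) := [[0, 1, 0], [2, 1, 0], [0, 0, 1]]

def Spec_calculateAdjacencies (warehouse : List (List Int)) (out : Int) : Prop := out = calculateAdjacencies_alt warehouse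
instance (warehouse : List (List Int)) (out : Int) : Decidable (Spec_calculateAdjacencies warehouse out) := by unfold Spec_calculateAdjacencies; infer_instance

-- ===== CLAIM (what is proved, stated in full; the proofs are below) =====
def Claim_equal_calculateAdjacencies : Prop := ∀ (warehouse : List (List Int)), Dom_calculateAdjacencies warehouse → Pre_calculateAdjacencies warehouse → Spec_calculateAdjacencies warehouse (calculateAdjacencies warehouse)

-- ===== LEMMAS AND PROOFS =====

theorem prefixRow_foldl_aux (r : List Int) (p : List Int) (acc : Int) :
    (r.foldl (fun (st : List Int × Int) v => (st.1 ++ [st.2 + v], st.2 + v)) (p, acc)).1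
    = p ++ (List.range r.length).map (fun k => acc + ((r.take (k+1)).sum)) := by
  induction r generalizing p acc with
  | nil => simp
  | cons v t ih =>
    simp only [List.foldl_cons, ih, List.length_cons, List.range_succ_eq_map, List.map_cons,
      List.map_map]
    simp [List.append_assoc, Function.comp, add_assoc]

theorem prefixRow_getD (r : List Int) (n : Nat) (h : n ≤ r.length) :
    (prefixRow r).getD n 0 = (r.take n).sum := by
  unfold prefixRow
  rw [prefixRow_foldl_aux]
  cases n with
  | zero => simp
  | succ m =>
    have hm : m < r.length := by omega
    simp [List.getD, hm]

theorem take_succ_sum (r : List Int) (n : Nat) (h : n < r.length) :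
    (r.take (n+1)).sum = (r.take n).sum + r.getD n 0 := by
  simp only [List.getD, List.getElem?_eq_getElem h, Option.getD_some]
  exact List.sum_take_succ r n h

theorem window_sum (r : List Int) (m : Nat) (h : m + 3 ≤ r.length) :
    (r.take (m+3)).sum - (r.take m).sum
      = r.getD m 0 + r.getD (m+1) 0 + r.getD (m+2) 0 := by
  have h0 : m < r.length := by omega
  have h1 : m + 1 < r.length := by omega
  have h2 : m + 2 < r.length := by omega
  have e2 : (r.take (m+3)).sum = (r.take (m+2)).sum + r.getD (m+2) 0 := by
    have := take_succ_sum r (m+2) h2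
    rwa [show m+2+1 = m+3 from rfl] at this
  have e1 : (r.take (m+2)).sum = (r.take (m+1)).sum + r.getD (m+1) 0 := by
    have := take_succ_sum r (m+1) h1
    rwa [show m+1+1 = m+2 from rfl] at this
  have e0 := take_succ_sum r m h0
  omega

-- three-element block via prefix differences
theorem prefix_diff_window (r : List Int) (j : Nat) (h1 : 1 ≤ j) (h2 : j + 2 ≤ r.length) :
    (prefixRow r).getD (j+2) 0 - (prefixRow r).getD (j-1) 0
      = r.getD (j-1) 0 + r.getD j 0 + r.getD (j+1) 0 := by
  rw [prefixRow_getD r (j+2) (by omega), prefixRow_getD r (j-1) (by omega)]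
  have := window_sum r (j-1) (by omega)
  have hj0 : j - 1 + 3 = j + 2 := by omega
  have hj1 : j - 1 + 1 = j := by omega
  have hj2 : j - 1 + 2 = j + 1 := by omega
  rw [hj0, hj1, hj2] at this
  exact this

theorem calculateAdjacencies_spec : Claim_equal_calculateAdjacencies := by
  intro w _ hpre
  unfold Spec_calculateAdjacencies calculateAdjacencies calculateAdjacencies_alt
  apply PySem.List.foldl_congr_mem
  intro res i hi
  rw [PySem.List.mem_pyRange_one] at hi
  obtain ⟨hi1, hi2⟩ := hi
  apply PySem.List.foldl_congr_mem
  intro res j hj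
  rw [PySem.List.mem_pyRange_one] at hj
  obtain ⟨hj1, hj2⟩ := hj
  -- nat versions of the indices
  set a := i.toNat with ha
  set b := j.toNat with hb
  have hia : i = (a : Int) := by omega
  have hjb : j = (b : Int) := by omega
  have ha1 : 1 ≤ a := by omega
  have hb1 : 1 ≤ b := by omega
  have ha2 : a + 1 < w.length := by omega
  -- rewrite every pyGetD access to Nat getD
  have hrow : PySem.List.pyGetD w i [] = w.getD a [] := by
    rw [hia, PySem.List.pyGetD_natCast]
  have hrowu : PySem.List.pyGetD w (i-1) [] = w.getD (a-1) [] := by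
    have : i - 1 = ((a - 1 : Nat) : Int) := by omega
    rw [this, PySem.List.pyGetD_natCast]
  have hrowd : PySem.List.pyGetD w (i+1) [] = w.getD (a+1) [] := by
    have : i + 1 = ((a + 1 : Nat) : Int) := by omega
    rw [this, PySem.List.pyGetD_natCast]
  rw [hrow, hrowu, hrowd]
  have hjlen : b + 1 < (w.getD a []).length := by
    rw [hrow] at hj2; omega
  split_ifs with hc
  · -- cell is 1: obtain bounds from Pre_ and compare the two sums
    have hcell : (w.getD a []).getD b 0 = 1 := by
      rw [hjb, PySem.List.pyGetD_natCast] at hc; exact hc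
    have hpre' := hpre a (by rw [List.mem_range]; omega) b
      (by rw [List.mem_range]; omega) ha1 ha2 hb1 hjlen hcell
    obtain ⟨hup, hdn⟩ := hpre'
    -- pref rows
    have hprefu : PySem.List.pyGetD (w.map prefixRow) (i-1) [] = prefixRow (w.getD (a-1) []) := by
      have h1 : i - 1 = ((a - 1 : Nat) : Int) := by omega
      rw [h1, PySem.List.pyGetD_natCast, List.getD, List.getD]
      rw [List.getElem?_map]
      have : a - 1 < w.length := by omega
      simp [List.getElem?_eq_getElem this]
    have hprefm : PySem.List.pyGetD (w.map prefixRow) i [] = prefixRow (w.getD a []) := by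
      rw [hia, PySem.List.pyGetD_natCast, List.getD, List.getD, List.getElem?_map]
      have : a < w.length := by omega
      simp [List.getElem?_eq_getElem this]
    have hprefd : PySem.List.pyGetD (w.map prefixRow) (i+1) [] = prefixRow (w.getD (a+1) []) := by
      have h1 : i + 1 = ((a + 1 : Nat) : Int) := by omega
      rw [h1, PySem.List.pyGetD_natCast, List.getD, List.getD, List.getElem?_map]
      simp [List.getElem?_eq_getElem ha2]
    rw [hprefu, hprefm, hprefd]
    -- index casts j-1, j+1, j+2
    have hjm : j - 1 = ((b - 1 : Nat) : Int) := by omega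
    have hjp : j + 1 = ((b + 1 : Nat) : Int) := by omega
    have hjq : j + 2 = ((b + 2 : Nat) : Int) := by omega
    rw [hjm, hjp, hjq, hjb]
    simp only [PySem.List.pyGetD_natCast]
    -- window identities for the three rows
    have wu := prefix_diff_window (w.getD (a-1) []) b hb1 hup
    have wm := prefix_diff_window (w.getD a []) b hb1 (by omega)
    have wd := prefix_diff_window (w.getD (a+1) []) b hb1 hdn
    rw [wu, wm, wd, hcell]
    have : ∀ x y : Int,
        (x = y) → ((if x < 4 then res + 1 else res) = (if y < 4 then res + 1 else res)) := by
      intro x y h; rw [h]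
    apply this
    ring
  · rfl
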